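-- pv_equiv track=rewrite | github.com/sjking/aoc2020 | 06/solution.py | count_group2
-- ===== SOURCE A (Python) =====
-- alphabet = list("abcdefghijklmnopqrstuvwxyz")
--
-- def count_group2(answers):
--     if len(answers) == 0:
--         return 0
--     d = dict()
--     for c in alphabet:
--         d[c] = 0
--     for line in answers:
--         s = set(alphabet)
--         for c in line:
--             if c in s:
--                 d[c] += 1
--                 s.remove(c)
--     count = 0
--     for v in d.values():
--         if v == len(answers):
--             count += 1
--     return count
-- ===== SOURCE B (Python) =====
-- alphabet = list("abcdefghijklmnopqrstuvwxyz")
--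
-- def count_group2(answers):
--     if not answers:
--         return 0
--     common = set(alphabet)
--     for line in answers:
--         common &= set(line)
--     return len(common)
-- ===== Notes on version B (the rewrite author's own statement) =====
-- stated objective: simpler
-- what changed: Replaces the per-letter count dictionary, the per-line seen-set bookkeeping and the final equality-to-line-count sweep by a single progressive set intersection starting from the alphabet.
import Mathlib
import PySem

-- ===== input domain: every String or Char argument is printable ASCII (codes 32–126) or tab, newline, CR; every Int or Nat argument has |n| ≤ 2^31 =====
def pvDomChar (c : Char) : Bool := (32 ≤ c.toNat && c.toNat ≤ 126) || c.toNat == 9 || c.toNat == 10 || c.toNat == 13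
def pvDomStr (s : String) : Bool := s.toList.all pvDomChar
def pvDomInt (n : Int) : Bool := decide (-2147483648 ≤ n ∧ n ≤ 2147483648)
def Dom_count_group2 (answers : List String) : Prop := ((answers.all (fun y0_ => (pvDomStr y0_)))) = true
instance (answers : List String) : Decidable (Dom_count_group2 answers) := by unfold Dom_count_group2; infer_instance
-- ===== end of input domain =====

-- B replaces A's per-letter count dictionary and final equality-to-line-count sweep
-- by a single progressive set intersection starting from the alphabet (simpler).


-- ===== PORT A =====
def pvAlphabet : List Char := "abcdefghijklmnopqrstuvwxyz".toList

-- one iteration of A's inner loop: 'if c in s: d[c] += 1; s.remove(c)'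
-- (s.remove(c) is guarded by 'c in s', so it never raises: Set.discard is exact here)
def pvStep (p : PySem.Dict Char Int × PySem.Set Char) (c : Char) :
    PySem.Dict Char Int × PySem.Set Char :=
  if PySem.Set.contains p.2 c then (PySem.Dict.modify p.1 c 0 (· + 1), PySem.Set.discard p.2 c) else p

-- A's per-line loop: fresh s = set(alphabet), then the inner loop over the line's chars
def pvLine (d : PySem.Dict Char Int) (line : String) : PySem.Dict Char Int :=
  (line.toList.foldl pvStep (d, PySem.Set.ofList pvAlphabet)).1

def count_group2 (answers : List String) : Int :=
  if answers.length = 0 then 0 else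
    (PySem.Dict.values (answers.foldl pvLine
        (pvAlphabet.foldl (fun d c => d.insert c 0) PySem.Dict.empty))).foldl
      (fun count v => if v = (answers.length : Int) then count + 1 else count) 0

-- ===== PORT B =====
def count_group2_alt (answers : List String) : Int :=
  if answers.isEmpty then 0 else
    PySem.Set.len (answers.foldl
      (fun common line => PySem.Set.inter common (PySem.Set.ofList line.toList))
      (PySem.Set.ofList pvAlphabet))

-- ===== PRECONDITION & SPEC =====
def Spec_count_group2 (answers : List String) (out : Int) : Prop := out = count_group2_alt answers
instance (answers : List String) (out : Int) : Decidable (Spec_count_group2 answers out) := by unfold Spec_count_group2; infer_instance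

-- ===== CLAIM (what is proved, stated in full; the proofs are below) =====
def Claim_equal_count_group2 : Prop := ∀ (answers : List String), Dom_count_group2 answers → Spec_count_group2 answers (count_group2 answers)

-- ===== LEMMAS AND PROOFS =====

theorem pvAlphabet_nodup : pvAlphabet.Nodup := by decide

-- A's inner loop increments d[c] by exactly one iff c is in the initial set and in the line
theorem pv_inner_getD (l : List Char) : ∀ (d : PySem.Dict Char Int) (s : PySem.Set Char) (c : Char),
    ((l.foldl pvStep (d, s)).1).getD c 0
      = d.getD c 0 + (if c ∈ s ∧ c ∈ l then 1 else 0) := by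
  induction l with
  | nil => intro d s c; simp
  | cons x xs ih =>
    intro d s c
    simp only [List.foldl_cons, pvStep]
    by_cases hx : x ∈ s
    · rw [if_pos (by simpa using (PySem.Set.contains_iff s x).2 hx)]
      rw [ih]
      rw [PySem.Dict.getD_modify]
      by_cases hcx : c = x
      · subst hcx
        simp [PySem.Set.mem_discard, hx]
      · simp [hcx, PySem.Set.mem_discard, List.mem_cons]
    · rw [if_neg (by simpa using fun h => hx ((PySem.Set.contains_iff s x).1 h))]
      rw [ih]
      by_cases hcx : c = x
      · subst hcx; simp [hx]
      · simp [List.mem_cons, hcx]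

-- A's inner loop never changes the dict's key list (it only modifies keys present in s ⊆ keys)
theorem pv_inner_keys (l : List Char) : ∀ (d : PySem.Dict Char Int) (s : PySem.Set Char),
    (∀ x ∈ s, x ∈ d.keys) → ((l.foldl pvStep (d, s)).1).keys = d.keys := by
  induction l with
  | nil => intro d s _; simp
  | cons x xs ih =>
    intro d s hsub
    simp only [List.foldl_cons, pvStep]
    by_cases hx : x ∈ s
    · rw [if_pos (by simpa using (PySem.Set.contains_iff s x).2 hx)]
      have hcont : d.contains x = true := (PySem.Dict.contains_iff_mem_keys d x).2 (hsub x hx)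
      have hkeys : (PySem.Dict.modify d x 0 (· + 1)).keys = d.keys := by
        rw [PySem.Dict.keys_modify, PySem.Dict.keys_insert_of_contains d _ hcont]
      rw [ih _ _ (fun y hy => by
        rw [hkeys]
        exact hsub y ((PySem.Set.mem_discard s x y).1 hy).1)]
      exact hkeys
    · rw [if_neg (by simpa using fun h => hx ((PySem.Set.contains_iff s x).1 h))]
      exact ih _ _ hsub

-- the initialization loop 'for c in alphabet: d[c] = 0'
theorem pv_init_getD : ∀ (l : List Char) (d : PySem.Dict Char Int),
    (∀ x, d.getD x 0 = 0) → ∀ c, (l.foldl (fun d c => d.insert c (0:Int)) d).getD c 0 = 0 := by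
  intro l
  induction l with
  | nil => intro d h c; simpa using h c
  | cons x xs ih =>
    intro d h c
    simp only [List.foldl_cons]
    exact ih _ (fun y => by rw [PySem.Dict.getD_insert]; split_ifs <;> simp [h]) c

theorem pv_init_keys :
    (pvAlphabet.foldl (fun d c => d.insert c (0:Int)) PySem.Dict.empty).keys = pvAlphabet := by
  decide

-- A's outer loop: after all lines, d[c] counts the lines containing c (for c in the alphabet),
-- and the keys stay the alphabet
theorem pv_outer (answers : List String) : ∀ (d : PySem.Dict Char Int), d.keys = pvAlphabet →
    (answers.foldl pvLine d).keys = pvAlphabet ∧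
      ∀ c ∈ pvAlphabet, (answers.foldl pvLine d).getD c 0
        = d.getD c 0 + (answers.countP (fun line => decide (c ∈ line.toList)) : Int) := by
  induction answers with
  | nil => intro d hk; exact ⟨hk, fun c _ => by simp⟩
  | cons line rest ih =>
    intro d hk
    simp only [List.foldl_cons]
    have hsub : ∀ x ∈ PySem.Set.ofList pvAlphabet, x ∈ d.keys := fun x hx => by
      rw [hk]; exact (PySem.Set.mem_ofList pvAlphabet x).1 hx
    have hkeys : (pvLine d line).keys = pvAlphabet := by
      rw [pvLine, pv_inner_keys _ _ _ hsub, hk]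
    obtain ⟨hk', hv⟩ := ih (pvLine d line) hkeys
    refine ⟨hk', fun c hc => ?_⟩
    rw [hv c hc, pvLine, pv_inner_getD]
    simp only [PySem.Set.mem_ofList, List.countP_cons]
    by_cases hcl : c ∈ line.toList
    · simp [hc, hcl]; ring
    · simp [hcl]

-- the final counting loop over d.values
theorem pv_count_fold (n : Int) : ∀ (vs : List Int) (acc : Int),
    vs.foldl (fun cnt v => if v = n then cnt + 1 else cnt) acc
      = acc + (vs.countP (fun v => decide (v = n)) : Int) := by
  intro vs
  induction vs with
  | nil => intro acc; simp
  | cons v vs ih =>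
    intro acc
    simp only [List.foldl_cons, List.countP_cons]
    rw [ih]
    by_cases h : v = n <;> simp [h] <;> try ring

-- B's loop: the running intersection is the alphabet filtered by 'contained in every line so far'
theorem pv_alt_fold (answers : List String) : ∀ (s : List Char),
    answers.foldl (fun common line => PySem.Set.inter common (PySem.Set.ofList line.toList)) s
      = s.filter (fun c => decide (∀ line ∈ answers, c ∈ line.toList)) := by
  induction answers with
  | nil => intro s; simp
  | cons line rest ih =>
    intro s
    simp only [List.foldl_cons]
    rw [ih]
    have : PySem.Set.inter s (PySem.Set.ofList line.toList)
        = s.filter (fun c => decide (c ∈ line.toList)) := by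
      show s.filter _ = _
      apply List.filter_congr
      intro c _
      simp [PySem.Set.mem_ofList]
    rw [this, List.filter_filter]
    apply List.filter_congr
    intro c _
    simp [List.mem_cons, Bool.and_comm]

theorem pv_ofList_alphabet : PySem.Set.ofList pvAlphabet = pvAlphabet :=
  PySem.Set.ofList_eq_self_of_nodup _ pvAlphabet_nodup

-- ===== VERDICT (by name: the statement is the Claim_ definition above) =====
theorem count_group2_spec : Claim_equal_count_group2 := by
  intro answers _
  unfold Spec_count_group2 count_group2 count_group2_alt
  cases answers with
  | nil => simp
  | cons a0 rest =>
    set answers := a0 :: rest with hans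
    have hne : answers.length ≠ 0 := by simp [hans]
    rw [if_neg hne, if_neg (by simp [hans] : answers.isEmpty ≠ true)]
    obtain ⟨hk, hv⟩ := pv_outer answers _ pv_init_keys
    -- A's side: values of the final dict
    rw [PySem.Dict.values_eq_map_keys _ (by rw [hk]; exact pvAlphabet_nodup) 0, hk]
    rw [pv_count_fold, List.countP_map]
    -- B's side
    rw [pv_alt_fold, pv_ofList_alphabet]
    show (0 : Int) + _ = PySem.Set.len _
    have hlen : PySem.Set.len (pvAlphabet.filter
        (fun c => decide (∀ line ∈ answers, c ∈ line.toList)))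
        = ((pvAlphabet.countP (fun c => decide (∀ line ∈ answers, c ∈ line.toList))) : Int) := by
      show ((List.length _ : Nat) : Int) = _
      rw [List.countP_eq_length_filter]
    rw [hlen, zero_add]
    congr 1
    apply List.countP_congr
    intro c hc
    have hval := hv c hc
    rw [pv_init_getD pvAlphabet PySem.Dict.empty (fun x => by simp) c, zero_add] at hval
    simp only [Function.comp_apply, hval]
    simp [Nat.cast_inj, List.countP_eq_length]
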